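-- pv_equiv track=rewrite | github.com/BenediktO/synctextranslator | linenumber_converter/converter.py | get_next_values
-- ===== SOURCE A (Python) =====
-- def get_next_values(array, value):
--     for a in array:
--         if a > value:
--             max_ = a
--             break
--     for a in array[::-1]:
--         if a < value:
--             min_ = a
--             break
--     return min_, max_
-- ===== SOURCE B (Python) =====
-- def get_next_values(array, value):
--     max_found = False
--     for a in array:
--         if a > value and not max_found:
--             max_ = a
--             max_found = True
--         if a < value:
--             min_ = a
--     return min_, max_
-- ===== Notes on version B (the rewrite author's own statement) =====
-- stated objective: alternative
-- what changed: Replaces A's two scans (a forward break-scan for the first element above value, and a scan over a reversed copy for the first element below it) with one forward pass that records the first greater element via a flag and overwrites the smaller one so the last survives; no reversed copy is built.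
import Mathlib
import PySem

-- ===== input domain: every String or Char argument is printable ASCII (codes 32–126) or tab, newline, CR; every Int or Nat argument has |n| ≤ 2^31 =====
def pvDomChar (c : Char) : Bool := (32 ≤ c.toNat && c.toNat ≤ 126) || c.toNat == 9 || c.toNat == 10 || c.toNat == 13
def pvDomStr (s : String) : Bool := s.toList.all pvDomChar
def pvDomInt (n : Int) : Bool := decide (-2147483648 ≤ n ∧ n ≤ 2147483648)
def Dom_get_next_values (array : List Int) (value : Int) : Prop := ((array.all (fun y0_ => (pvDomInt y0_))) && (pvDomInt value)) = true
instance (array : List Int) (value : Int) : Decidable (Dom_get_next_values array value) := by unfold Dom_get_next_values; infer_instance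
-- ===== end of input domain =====

-- B replaces A's two scans (one over a reversed copy) with one forward pass tracking both bounds; same cost, no reversed copy.


-- ===== PORT A =====
-- first loop: break at the first a with a > value
def pvFindGt : List Int → Int → Option Int
  | [], _ => none
  | a :: rest, v => if a > v then some a else pvFindGt rest v

-- second loop: break at the first a with a < value
def pvFindLt : List Int → Int → Option Int
  | [], _ => none
  | a :: rest, v => if a < v then some a else pvFindLt rest v

def get_next_values (array : List Int) (value : Int) : List Int :=
  let max_ := pvFindGt array value
  let min_ := pvFindLt array.reverse value          -- array[::-1]
  match min_, max_ with                             -- return min_, max_ (NameError cases excluded by Pre_)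
  | some m, some M => [m, M]
  | _, _ => []

-- ===== PORT B =====
-- single pass; state = (max_found, max_, min_)
def pvStep (value : Int) (st : Bool × Option Int × Option Int) (a : Int) : Bool × Option Int × Option Int :=
  let st1 := if a > value ∧ st.1 = false then (true, some a, st.2.2) else st
  if a < value then (st1.1, st1.2.1, some a) else st1

def get_next_values_alt (array : List Int) (value : Int) : List Int :=
  let st := array.foldl (pvStep value) (false, none, none)
  match st.2.2 with                                  -- return min_, max_ (NameError cases excluded by Pre_)
  | none => []
  | some m => match st.2.1 with
    | none => []
    | some M => [m, M]

-- ===== PRECONDITION & SPEC =====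
-- Pre_ excludes exactly the inputs where A raises NameError: no element strictly below value, or none strictly above it.
def Pre_get_next_values (array : List Int) (value : Int) : Prop :=
  (array.any (fun a => a > value)) = true ∧ (array.any (fun a => a < value)) = true
instance (array : List Int) (value : Int) : Decidable (Pre_get_next_values array value) := by unfold Pre_get_next_values; infer_instance
def pvWitness_get_next_values : List Int × Int := ([1, 5, 9], 4)
def Spec_get_next_values (array : List Int) (value : Int) (out : List Int) : Prop := out = get_next_values_alt array value
instance (array : List Int) (value : Int) (out : List Int) : Decidable (Spec_get_next_values array value out) := by unfold Spec_get_next_values; infer_instance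

-- ===== CLAIM (what is proved, stated in full; the proofs are below) =====
def Claim_equal_get_next_values : Prop := ∀ (array : List Int) (value : Int), Dom_get_next_values array value → Pre_get_next_values array value → Spec_get_next_values array value (get_next_values array value)

-- ===== LEMMAS AND PROOFS =====
-- option orElse specialised (first non-none wins)
def pvOr (x y : Option Int) : Option Int := match x with | some a => some a | none => y

theorem pvFindLt_append (xs ys : List Int) (v : Int) :
    pvFindLt (xs ++ ys) v = pvOr (pvFindLt xs v) (pvFindLt ys v) := by
  induction xs with
  | nil => simp [pvFindLt, pvOr]
  | cons a rest ih =>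
    simp only [List.cons_append, pvFindLt]
    by_cases h : a < v <;> simp [h, pvOr, ih]

-- fold invariant: the max component is the first stored > value (sticky), the min component the last < value seen
theorem pvFold_inv (v : Int) : ∀ (xs : List Int) (mx mn : Option Int),
    xs.foldl (pvStep v) (mx.isSome, mx, mn) =
      ((pvOr mx (pvFindGt xs v)).isSome, pvOr mx (pvFindGt xs v), pvOr (pvFindLt xs.reverse v) mn) := by
  intro xs
  induction xs with
  | nil => intro mx mn; cases mx <;> simp [pvFindGt, pvFindLt, pvOr]
  | cons a rest ih =>
    intro mx mn
    have hrev : (a :: rest).reverse = rest.reverse ++ [a] := by simp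
    rw [List.foldl_cons, hrev, pvFindLt_append]
    cases mx with
    | some M =>
      have hstep : pvStep v (Option.isSome (some M), some M, mn) a =
          ((some M : Option Int).isSome, some M, if a < v then some a else mn) := by
        simp [pvStep]
        by_cases h : a < v <;> simp [h]
      rw [hstep, ih (some M) (if a < v then some a else mn)]
      by_cases h : a < v <;>
        simp [pvOr, pvFindLt, h] <;> cases pvFindLt rest.reverse v <;> simp
    | none =>
      by_cases hg : a > v
      · have hlt : ¬ a < v := by omega
        have hstep : pvStep v ((none : Option Int).isSome, none, mn) a =
            ((some a : Option Int).isSome, some a, mn) := by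
          simp [pvStep, hg, hlt]
        rw [hstep, ih (some a) mn]
        simp only [pvOr, pvFindGt, pvFindLt, if_pos hg, if_neg hlt]
        cases pvFindLt rest.reverse v <;> simp
      · have hstep : pvStep v ((none : Option Int).isSome, none, mn) a =
            ((none : Option Int).isSome, none, if a < v then some a else mn) := by
          simp [pvStep, hg]
          by_cases h : a < v <;> simp [h]
        rw [hstep, ih none (if a < v then some a else mn)]
        by_cases h : a < v <;>
          simp [pvOr, pvFindGt, pvFindLt, hg, h] <;> cases pvFindLt rest.reverse v <;> simp

-- ===== VERDICT (by name: the statement is the Claim_ definition above) =====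
theorem get_next_values_spec : Claim_equal_get_next_values := by
  intro array value _ _
  unfold Spec_get_next_values get_next_values get_next_values_alt
  have h := pvFold_inv value array none none
  simp only [Option.isSome_none] at h
  rw [h]
  simp [pvOr]
  cases pvFindLt array.reverse value <;> cases pvFindGt array value <;> simp
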